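-- pv_equiv track=rewrite | github.com/GizawAAiT/Codeforces | A_Fox_And_Snake.py | solve
-- ===== SOURCE A (Python) =====
-- def solve(n, m):
--     res = []
--     for row in range(n):
--         if (row+1)%2 == 1:
--             res.append('#'*m)
--
--         elif (row+1) % 4 == 0:
--             res.append('#' + '.'*(m-1))
--
--         else:
--             res.append('.'*(m-1) + '#')
--
--     return res
-- ===== SOURCE B (Python) =====
-- def solve(n, m):
--     # tile a precomputed 4-row block and cut it to length n
--     reps = (n + 3) // 4
--     if reps <= 0:
--         return []
--     dots = '.' * (m - 1)
--     block = ['#' * m, dots + '#', '#' * m, '#' + dots]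
--     return (block * reps)[:n]
-- ===== Notes on version B (the rewrite author's own statement) =====
-- stated objective: alternative
-- what changed: B precomputes the period-4 block of four row strings once, tiles it ((n+3)//4 copies) and slices the tiling to n rows, instead of A's per-row loop with a parity/mod-4 branch cascade rebuilding each row string.
import Mathlib
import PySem

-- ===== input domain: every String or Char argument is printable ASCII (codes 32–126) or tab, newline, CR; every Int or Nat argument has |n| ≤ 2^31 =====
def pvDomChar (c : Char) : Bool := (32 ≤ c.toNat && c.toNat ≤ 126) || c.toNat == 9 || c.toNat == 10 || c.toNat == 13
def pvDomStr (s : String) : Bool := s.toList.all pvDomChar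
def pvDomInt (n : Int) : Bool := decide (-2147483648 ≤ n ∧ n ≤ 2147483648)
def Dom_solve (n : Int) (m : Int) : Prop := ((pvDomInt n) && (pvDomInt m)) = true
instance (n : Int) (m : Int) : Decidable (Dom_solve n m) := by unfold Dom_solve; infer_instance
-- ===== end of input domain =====

-- B replaces A's per-row branch cascade by tiling a precomputed 4-row block and slicing it to n rows.

-- ===== PORT A =====
-- '#'*m is String.ofList (List.replicate m.toNat '#'): empty for m ≤ 0, exactly as in Python.
def solve (n : Int) (m : Int) : List String :=
  (PySem.List.pyRange 0 n 1).foldl (fun res row =>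
    if PySem.Int.mod (row + 1) 2 = 1 then
      res ++ [String.ofList (List.replicate m.toNat '#')]
    else if PySem.Int.mod (row + 1) 4 = 0 then
      res ++ [String.ofList ('#' :: List.replicate (m - 1).toNat '.')]
    else
      res ++ [String.ofList (List.replicate (m - 1).toNat '.' ++ ['#'])]) []

-- ===== PORT B =====
def solve_alt (n : Int) (m : Int) : List String :=
  let reps := PySem.Int.floordiv (n + 3) 4
  if reps ≤ 0 then []
  else
    let dots := List.replicate (m - 1).toNat '.'
    let block := [String.ofList (List.replicate m.toNat '#'),
                  String.ofList (dots ++ ['#']),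
                  String.ofList (List.replicate m.toNat '#'),
                  String.ofList ('#' :: dots)]
    PySem.List.slice (PySem.List.pyRepeat block reps) none (some n)

-- ===== PRECONDITION & SPEC =====
def Spec_solve (n : Int) (m : Int) (out : List String) : Prop := out = solve_alt n m
instance (n : Int) (m : Int) (out : List String) : Decidable (Spec_solve n m out) := by unfold Spec_solve; infer_instance

-- ===== CLAIM (what is proved, stated in full; the proofs are below) =====
def Claim_equal_solve : Prop := ∀ (n : Int) (m : Int), Dom_solve n m → Spec_solve n m (solve n m)

-- ===== LEMMAS AND PROOFS =====

-- the four-row block as a function of m (proof-only helper)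
def blockL (m : Int) : List String :=
  [String.ofList (List.replicate m.toNat '#'),
   String.ofList (List.replicate (m - 1).toNat '.' ++ ['#']),
   String.ofList (List.replicate m.toNat '#'),
   String.ofList ('#' :: List.replicate (m - 1).toNat '.')]

-- the row A emits at index `row` (proof-only helper)
def rowA (m row : Int) : String :=
  if PySem.Int.mod (row + 1) 2 = 1 then String.ofList (List.replicate m.toNat '#')
  else if PySem.Int.mod (row + 1) 4 = 0 then String.ofList ('#' :: List.replicate (m - 1).toNat '.')
  else String.ofList (List.replicate (m - 1).toNat '.' ++ ['#'])

theorem pymod_two (a : Int) : PySem.Int.mod a 2 = a % 2 := by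
  simp [PySem.Int.mod, Int.fmod_eq_emod]

theorem pymod_four (a : Int) : PySem.Int.mod a 4 = a % 4 := by
  simp [PySem.Int.mod, Int.fmod_eq_emod]

theorem solve_eq_map (n m : Int) :
    solve n m = List.map (fun k : Nat => rowA m (k : Int)) (List.range n.toNat) := by
  unfold solve
  rw [show (fun (res : List String) (row : Int) =>
        if PySem.Int.mod (row + 1) 2 = 1 then
          res ++ [String.ofList (List.replicate m.toNat '#')]
        else if PySem.Int.mod (row + 1) 4 = 0 then
          res ++ [String.ofList ('#' :: List.replicate (m - 1).toNat '.')]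
        else
          res ++ [String.ofList (List.replicate (m - 1).toNat '.' ++ ['#'])])
      = (fun res row => res ++ [rowA m row]) from
    funext fun res => funext fun row => by unfold rowA; split_ifs <;> rfl]
  rw [PySem.List.foldl_append_singleton_eq_map, PySem.List.pyRange_one,
      List.nil_append, List.map_map]
  simp only [sub_zero]
  exact List.map_congr_left fun k _ => by
    show rowA m (0 + (k : Int)) = rowA m (k : Int)
    rw [zero_add]

theorem rowA_eq_block (m : Int) (k : Nat) :
    rowA m (k : Int) = (blockL m).getD (k % 4) "" := by
  unfold rowA
  rw [pymod_two, pymod_four]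
  have hr : k % 4 = 0 ∨ k % 4 = 1 ∨ k % 4 = 2 ∨ k % 4 = 3 := by omega
  rcases hr with hr | hr | hr | hr
  · have c2 : ((k : Int) + 1) % 2 = 1 := by omega
    rw [hr]; simp [c2, blockL]
  · have c2 : ((k : Int) + 1) % 2 = 0 := by omega
    have c4 : ((k : Int) + 1) % 4 = 2 := by omega
    rw [hr]; simp [c2, c4, blockL]
  · have c2 : ((k : Int) + 1) % 2 = 1 := by omega
    rw [hr]; simp [c2, blockL]
  · have c2 : ((k : Int) + 1) % 2 = 0 := by omega
    have c4 : ((k : Int) + 1) % 4 = 0 := by omega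
    rw [hr]; simp [c2, c4, blockL]

theorem flatten_replicate_block (m : Int) (k : Nat) :
    (List.replicate k (blockL m)).flatten
      = (List.range (4 * k)).map (fun r => (blockL m).getD (r % 4) "") := by
  induction k with
  | zero => simp
  | succ k ih =>
    rw [List.replicate_succ, List.flatten_cons, ih,
        show 4 * (k + 1) = 4 + 4 * k from by ring,
        List.range_add, List.map_append]
    congr 1
    rw [List.map_map]
    exact List.map_congr_left fun r _ => by
      show _ = (blockL m).getD ((4 + r) % 4) ""
      rw [Nat.add_mod_left]

theorem solve_alt_if (n m : Int) :
    solve_alt n m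
      = if PySem.Int.floordiv (n + 3) 4 ≤ 0 then []
        else PySem.List.slice
          ((List.replicate (PySem.Int.floordiv (n + 3) 4).toNat (blockL m)).flatten)
          none (some n) := rfl

theorem solve_eq_alt (n m : Int) : solve n m = solve_alt n m := by
  have hdiv := PySem.Int.floordiv_mul_add_mod (n + 3) 4
  have hm0 : 0 ≤ PySem.Int.mod (n + 3) 4 := by rw [pymod_four]; omega
  have hm4 : PySem.Int.mod (n + 3) 4 < 4 := by rw [pymod_four]; omega
  rw [solve_alt_if]
  by_cases hn : n ≤ 0
  · have hq : PySem.Int.floordiv (n + 3) 4 ≤ 0 := by omega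
    have hz : n.toNat = 0 := by omega
    rw [if_pos hq, solve_eq_map, hz]
    simp
  · have hn' : 0 ≤ n := by omega
    have hq : n ≤ 4 * PySem.Int.floordiv (n + 3) 4 := by omega
    have hq0 : ¬ PySem.Int.floordiv (n + 3) 4 ≤ 0 := by omega
    rw [if_neg hq0, flatten_replicate_block, PySem.List.slice_to _ hn',
        ← List.map_take, List.take_range]
    have hmin : min n.toNat (4 * (PySem.Int.floordiv (n + 3) 4).toNat) = n.toNat := by
      omega
    rw [hmin, solve_eq_map]
    exact List.map_congr_left fun k _ => rowA_eq_block m k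

-- ===== VERDICT (by name: the statement is the Claim_ definition above) =====
theorem solve_spec : Claim_equal_solve := by
  intro n m _
  unfold Spec_solve
  exact solve_eq_alt n m
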